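-- pv_equiv track=rewrite | github.com/m4ll0k/Atlas | tamper/general_overlogutf8more.py | general_overlogutf8more
-- ===== SOURCE A (Python) =====
-- import string
--
-- def general_overlogutf8more(payload):
-- 	# -- general -- #
-- 	_payload = payload
-- 	if payload:
-- 		_payload = ""
-- 		i = 0
-- 		while i < len(payload):
-- 			if payload[i] == '%' and (i<len(payload)-2)and payload[i+1:i+2] in string.hexdigits and payload[i+2:i+3] in string.hexdigits:
-- 				_payload += payload[i:i+3]
-- 				i += 3
-- 			else:
-- 				_payload += "%%%.2X%%%.2X"%(0xc0+(ord(payload[i])>>6),0x80+(ord(payload[i])&0x3f))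
-- 				i += 1
-- 	return _payload
-- ===== SOURCE B (Python) =====
-- import string
--
-- _HEX = set(string.hexdigits)
--
-- def _enc_chunk(chunk):
--     # overlong-encode every char of chunk
--     return "".join("%%%.2X%%%.2X" % (0xc0 + (ord(c) >> 6), 0x80 + (ord(c) & 0x3f)) for c in chunk)
--
-- def general_overlogutf8more(payload):
--     if not payload:
--         return payload
--     parts = []
--     i = 0
--     n = len(payload)
--     while True:
--         j = payload.find('%', i)
--         if j == -1:
--             parts.append(_enc_chunk(payload[i:]))
--             break
--         if j < n - 2 and payload[j + 1] in _HEX and payload[j + 2] in _HEX: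
--             parts.append(_enc_chunk(payload[i:j]))
--             parts.append(payload[j:j + 3])
--             i = j + 3
--         else:
--             parts.append(_enc_chunk(payload[i:j + 1]))
--             i = j + 1
--     return "".join(parts)
-- ===== Notes on version B (the rewrite author's own statement) =====
-- stated objective: faster
-- what changed: Replaces A's per-character while-loop with quadratic string concatenation by a str.find-driven scan that jumps to the next percent sign, overlong-encodes whole chunks between percent tokens with join, and assembles the result from a parts list.
import Mathlib
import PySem

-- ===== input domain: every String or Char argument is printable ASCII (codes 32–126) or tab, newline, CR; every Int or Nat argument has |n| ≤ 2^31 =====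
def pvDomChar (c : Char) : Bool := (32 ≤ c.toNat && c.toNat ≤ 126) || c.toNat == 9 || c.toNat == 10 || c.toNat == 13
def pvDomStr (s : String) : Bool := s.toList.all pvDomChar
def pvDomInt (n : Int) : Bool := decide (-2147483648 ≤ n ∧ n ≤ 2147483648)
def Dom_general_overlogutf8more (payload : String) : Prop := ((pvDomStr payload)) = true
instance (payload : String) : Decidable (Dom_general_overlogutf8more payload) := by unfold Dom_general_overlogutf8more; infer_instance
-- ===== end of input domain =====

-- B replaces A's per-character while-loop (quadratic += string building) by a str.find-driven scan that
-- jumps to the next percent sign and joins chunk encodings from a parts list; same return value, measured faster.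

-- ===== PORT A =====
-- string.hexdigits
def pvHexdigits : List Char := "0123456789abcdefABCDEF".toList

-- one uppercase hex digit
def pvHexDigit (n : Nat) : Char := if n < 10 then Char.ofNat (48 + n) else Char.ofNat (55 + n)

-- "%%%.2X" % b, exact for b < 256 (always the case for the bytes formed below from Dom chars)
def pvPct2X (b : Nat) : List Char := ['%', pvHexDigit (b / 16 % 16), pvHexDigit (b % 16)]

-- "%%%.2X%%%.2X" % (0xc0+(ord(c)>>6), 0x80+(ord(c)&0x3f))
def pvEncChar (c : Char) : List Char := pvPct2X (0xc0 + (c.toNat >>> 6)) ++ pvPct2X (0x80 + (c.toNat &&& 63))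

-- the while loop of A: index i, accumulator _payload
def pvALoop (p : List Char) (i : Nat) (acc : List Char) : List Char :=
  if h : i < p.length then
    if p[i] = '%' ∧ (i : Int) < (p.length : Int) - 2
        ∧ PySem.Chars.isIn (PySem.List.slice p (some ((i+1 : Nat) : Int)) (some ((i+2 : Nat) : Int))) pvHexdigits = true
        ∧ PySem.Chars.isIn (PySem.List.slice p (some ((i+2 : Nat) : Int)) (some ((i+3 : Nat) : Int))) pvHexdigits = true then
      pvALoop p (i + 3) (acc ++ PySem.List.slice p (some ((i : Nat) : Int)) (some ((i+3 : Nat) : Int)))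
    else
      pvALoop p (i + 1) (acc ++ pvEncChar p[i])
  else acc
termination_by p.length - i

def general_overlogutf8more (payload : String) : String :=
  if payload = "" then payload else String.mk (pvALoop payload.toList 0 [])

-- ===== PORT B =====
-- _HEX = set(string.hexdigits)
def pvHexSet : List Char := PySem.Set.ofList pvHexdigits

-- _enc_chunk: "".join of the per-char overlong encodings
def pvEncChunk (cs : List Char) : List Char := cs.flatMap pvEncChar

-- payload.find('%', i) past the end of the string is -1 (the port's loop needs the bounds below for termination)
theorem pvFF_gt (p : List Char) (i : Nat) (h : p.length < i) :
    PySem.Chars.findFrom p ['%'] (i : Int) = -1 := by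
  simp only [PySem.Chars.findFrom]
  split_ifs <;> omega

-- bounds of payload.find('%', i) when it succeeds
theorem pvFindPct_bounds (p : List Char) (i : Nat)
    (h : PySem.Chars.findFrom p ['%'] (i : Int) ≠ -1) :
    i ≤ (PySem.Chars.findFrom p ['%'] (i : Int)).toNat ∧
      (PySem.Chars.findFrom p ['%'] (i : Int)).toNat < p.length := by
  by_cases hle : i ≤ p.length
  · obtain ⟨h1, h2, -⟩ := PySem.Chars.findFrom_natCast_spec p ['%'] i hle h
    refine ⟨?_, ?_⟩
    · omega
    · rcases h2 with ⟨t, ht⟩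
      have := congrArg List.length ht
      simp [List.length_drop] at this
      omega
  · exact absurd (pvFF_gt p i (by omega)) h

-- the while True loop of B: find the next '%', encode the chunk before it, copy or encode the token
def pvBLoop (p : List Char) (i : Nat) (acc : List Char) : List Char :=
  let j := PySem.Chars.findFrom p ['%'] (i : Int)
  if hj : j = -1 then
    acc ++ pvEncChunk (PySem.List.slice p (some ((i : Nat) : Int)) none)
  else
    -- payload[j+1]/payload[j+2] are read only under the short-circuited bound j < n-2, hence in range
    if ((j.toNat : Int) < (p.length : Int) - 2
        ∧ pvHexSet.contains (p.getD (j.toNat + 1) ' ') = true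
        ∧ pvHexSet.contains (p.getD (j.toNat + 2) ' ') = true) then
      pvBLoop p (j.toNat + 3)
        (acc ++ pvEncChunk (PySem.List.slice p (some ((i : Nat) : Int)) (some ((j.toNat : Nat) : Int)))
             ++ PySem.List.slice p (some ((j.toNat : Nat) : Int)) (some ((j.toNat + 3 : Nat) : Int)))
    else
      pvBLoop p (j.toNat + 1)
        (acc ++ pvEncChunk (PySem.List.slice p (some ((i : Nat) : Int)) (some ((j.toNat + 1 : Nat) : Int))))
termination_by p.length - i
decreasing_by
  · have := pvFindPct_bounds p i hj; omega
  · have := pvFindPct_bounds p i hj; omega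

def general_overlogutf8more_alt (payload : String) : String :=
  if payload = "" then payload else String.mk (pvBLoop payload.toList 0 [])

-- ===== PRECONDITION & SPEC =====
def Spec_general_overlogutf8more (payload : String) (out : String) : Prop := out = general_overlogutf8more_alt payload
instance (payload : String) (out : String) : Decidable (Spec_general_overlogutf8more payload out) := by unfold Spec_general_overlogutf8more; infer_instance

-- ===== CLAIM (what is proved, stated in full; the proofs are below) =====
def Claim_equal_general_overlogutf8more : Prop := ∀ (payload : String), Dom_general_overlogutf8more payload → Spec_general_overlogutf8more payload (general_overlogutf8more payload)

-- ===== LEMMAS AND PROOFS =====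

-- proof-side view of payload.find('%', i): index of the first '%' at or after i
def pvF (p : List Char) (i : Nat) : Option Nat := ((p.drop i).findIdx? (· = '%')).map (i + ·)

theorem pvGo_eq_findIdx (cs : List Char) (k : Nat) :
    PySem.Chars.find.go ['%'] cs k =
      (match cs.findIdx? (· = '%') with | none => (-1 : Int) | some j => ((k + j : Nat) : Int)) := by
  induction cs generalizing k with
  | nil => simp [PySem.Chars.find.go]
  | cons c t ih =>
      rw [PySem.Chars.find.go]
      by_cases hc : c = '%'
      · simp [hc, List.isPrefixOf, List.findIdx?_cons]
      · have hpre : List.isPrefixOf ['%'] (c :: t) = false := by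
          simp [List.isPrefixOf]; exact fun h => (hc h.symm).elim
        rw [hpre]
        simp only [Bool.false_eq_true, if_false, ih]
        simp only [List.findIdx?_cons, decide_eq_true_eq, hc, if_false]
        cases t.findIdx? (· = '%') with
        | none => simp
        | some j => simp; ring

theorem pvFF_eq (p : List Char) (i : Nat) (h : i ≤ p.length) :
    PySem.Chars.findFrom p ['%'] (i : Int) =
      (match pvF p i with | none => (-1 : Int) | some j => (j : Int)) := by
  rw [PySem.Chars.findFrom_natCast p ['%'] i h]
  have := pvGo_eq_findIdx (p.drop i) 0
  simp only [PySem.Chars.find] at *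
  rw [this]
  unfold pvF
  cases (p.drop i).findIdx? (· = '%') with
  | none => simp
  | some j => simp

theorem pvF_ge (p : List Char) (i : Nat) (h : p.length ≤ i) : pvF p i = none := by
  unfold pvF
  rw [List.drop_eq_nil_of_le h]
  rfl

theorem pvF_lt (p : List Char) (i : Nat) (h : i < p.length) :
    pvF p i = if p[i] = '%' then some i else pvF p (i + 1) := by
  unfold pvF
  rw [List.drop_eq_getElem_cons h, List.findIdx?_cons]
  by_cases hc : p[i] = '%'
  · simp [hc]
  · simp only [hc, decide_false, Bool.false_eq_true, if_false]
    rw [Option.map_map]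
    cases (p.drop (i+1)).findIdx? (· = '%') with
    | none => simp
    | some j => simp [if_neg hc]; omega

theorem pvF_some (p : List Char) (i j : Nat) (h : pvF p i = some j) :
    i ≤ j ∧ j < p.length ∧ p[j]? = some '%' := by
  unfold pvF at h
  cases hk : (p.drop i).findIdx? (· = '%') with
  | none => rw [hk] at h; simp at h
  | some k =>
      rw [hk] at h
      simp at h
      obtain ⟨hb, hp, -⟩ := List.findIdx?_eq_some_iff_getElem.mp hk
      rw [List.length_drop] at hb
      rw [List.getElem_drop] at hp
      refine ⟨by omega, by omega, ?_⟩
      rw [List.getElem?_eq_getElem (by omega)]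
      simp at hp
      simp [← h, hp]

theorem pvBLoop_ge (p : List Char) (i : Nat) (acc : List Char) (h : p.length ≤ i) :
    pvBLoop p i acc = acc := by
  have hff : PySem.Chars.findFrom p ['%'] (i : Int) = -1 := by
    rcases Nat.lt_or_ge p.length i with h1 | h1
    · exact pvFF_gt p i h1
    · rw [pvFF_eq p i h1, pvF_ge p i h]
  rw [pvBLoop]
  simp only [hff]
  rw [dif_pos trivial, PySem.List.slice_from p (by omega : (0:Int) ≤ (i:Int)),
      List.drop_eq_nil_of_le (by omega)]
  simp [pvEncChunk]

theorem pvALoop_ge (p : List Char) (i : Nat) (acc : List Char) (h : ¬ i < p.length) :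
    pvALoop p i acc = acc := by
  rw [pvALoop, dif_neg h]

-- singleton membership bridges for the two hex tests
theorem pvIsIn_singleton (c : Char) (l : List Char) :
    PySem.Chars.isIn [c] l = true ↔ c ∈ l := by
  rw [PySem.Chars.isIn_iff_infix, List.singleton_infix_iff]

theorem pvHexSet_contains (c : Char) : pvHexSet.contains c = true ↔ c ∈ pvHexdigits := by
  unfold pvHexSet
  rw [List.contains_iff_mem]
  exact PySem.Set.mem_ofList pvHexdigits c

-- B's loop skips a non-'%' character exactly like A's else branch
-- splitting one leading character off a slice
theorem pvSlice_cons (p : List Char) (i j : Nat) (hi : i < p.length) (hij : i < j) :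
    PySem.List.slice p (some ((i : Nat) : Int)) (some ((j : Nat) : Int)) =
      p[i] :: PySem.List.slice p (some ((i+1 : Nat) : Int)) (some ((j : Nat) : Int)) := by
  rw [PySem.List.slice_natCast, PySem.List.slice_natCast, List.drop_eq_getElem_cons hi,
      show j - i = (j - (i+1)) + 1 by omega, List.take_succ_cons]

theorem pvEncChunk_cons (c : Char) (cs : List Char) :
    pvEncChunk (c :: cs) = pvEncChar c ++ pvEncChunk cs := by
  simp [pvEncChunk]

-- B's loop skips a non-'%' character exactly like A's else branch
theorem pvBLoop_step (p : List Char) (i : Nat) (acc : List Char)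
    (hi : i < p.length) (hc : ¬ p[i] = '%') :
    pvBLoop p i acc = pvBLoop p (i + 1) (acc ++ pvEncChar p[i]) := by
  have hFi : PySem.Chars.findFrom p ['%'] (i : Int) =
      (match pvF p (i+1) with | none => (-1 : Int) | some j => (j : Int)) := by
    rw [pvFF_eq p i hi.le, pvF_lt p i hi, if_neg hc]
  have hFi1 : PySem.Chars.findFrom p ['%'] ((i+1 : Nat) : Int) =
      (match pvF p (i+1) with | none => (-1 : Int) | some j => (j : Int)) :=
    pvFF_eq p (i+1) (by omega)
  cases hcase : pvF p (i+1) with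
  | none =>
      rw [hcase] at hFi hFi1
      conv_lhs => rw [pvBLoop]
      conv_rhs => rw [pvBLoop]
      simp only [hFi, hFi1]
      rw [dif_pos trivial, dif_pos trivial,
          PySem.List.slice_from p (by omega : (0:Int) ≤ ((i:Nat):Int)),
          PySem.List.slice_from p (by omega : (0:Int) ≤ ((i+1:Nat):Int)),
          Int.toNat_natCast, Int.toNat_natCast, List.drop_eq_getElem_cons hi,
          pvEncChunk_cons, List.append_assoc]
  | some j =>
      obtain ⟨hij, hjl, -⟩ := pvF_some p (i+1) j hcase
      rw [hcase] at hFi hFi1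
      conv_lhs => rw [pvBLoop]
      conv_rhs => rw [pvBLoop]
      simp only [hFi, hFi1]
      rw [dif_neg (by omega : ¬ ((j:Nat):Int) = -1), dif_neg (by omega : ¬ ((j:Nat):Int) = -1)]
      simp only [Int.toNat_natCast]
      by_cases hg : ((j:Int) < (p.length : Int) - 2
          ∧ pvHexSet.contains (p.getD (j + 1) ' ') = true
          ∧ pvHexSet.contains (p.getD (j + 2) ' ') = true)
      · rw [if_pos hg, if_pos hg]
        congr 1
        rw [pvSlice_cons p i j hi (by omega), pvEncChunk_cons]
        simp [List.append_assoc]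
      · rw [if_neg hg, if_neg hg]
        congr 1
        rw [pvSlice_cons p i (j+1) hi (by omega), pvEncChunk_cons]
        simp [List.append_assoc]

theorem pvMain (p : List Char) (n : Nat) : ∀ (i : Nat) (acc : List Char), p.length ≤ i + n →
    pvALoop p i acc = pvBLoop p i acc := by
  induction n with
  | zero =>
      intro i acc h
      rw [pvALoop_ge p i acc (by omega), pvBLoop_ge p i acc (by omega)]
  | succ n ih =>
      intro i acc h
      by_cases hi : i < p.length
      · by_cases hc : p[i] = '%'
        · -- the token case: B's find lands exactly at i
          have hFi : PySem.Chars.findFrom p ['%'] ((i : Nat) : Int) = ((i : Nat) : Int) := by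
            rw [pvFF_eq p i hi.le, pvF_lt p i hi, if_pos hc]
          conv_rhs => rw [pvBLoop]
          simp only [hFi]
          rw [dif_neg (by omega : ¬ ((i:Nat):Int) = -1)]
          simp only [Int.toNat_natCast]
          conv_lhs => rw [pvALoop]
          rw [dif_pos hi]
          by_cases hlen : (i : Int) < (p.length : Int) - 2
          · have hi1 : i + 1 < p.length := by omega
            have hi2 : i + 2 < p.length := by omega
            have hs1 : PySem.List.slice p (some ((i+1 : Nat) : Int)) (some ((i+2 : Nat) : Int)) = [p[i+1]] := by
              rw [pvSlice_cons p (i+1) (i+2) hi1 (by omega), PySem.List.slice_natCast]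
              simp
            have hs2 : PySem.List.slice p (some ((i+2 : Nat) : Int)) (some ((i+3 : Nat) : Int)) = [p[i+2]] := by
              rw [pvSlice_cons p (i+2) (i+3) hi2 (by omega), PySem.List.slice_natCast]
              simp
            have hg1 : p.getD (i+1) ' ' = p[i+1] := List.getD_eq_getElem p ' ' hi1
            have hg2 : p.getD (i+2) ' ' = p[i+2] := List.getD_eq_getElem p ' ' hi2
            by_cases hx1 : p[i+1] ∈ pvHexdigits
            · by_cases hx2 : p[i+2] ∈ pvHexdigits
              · -- both guards true: copy the three-char token
                rw [if_pos ⟨hc, hlen, by rw [hs1]; exact (pvIsIn_singleton _ _).mpr hx1,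
                            by rw [hs2]; exact (pvIsIn_singleton _ _).mpr hx2⟩,
                    if_pos ⟨hlen, by rw [hg1]; exact (pvHexSet_contains _).mpr hx1,
                            by rw [hg2]; exact (pvHexSet_contains _).mpr hx2⟩]
                have hnil : PySem.List.slice p (some ((i : Nat) : Int)) (some ((i : Nat) : Int)) = [] := by
                  rw [PySem.List.slice_natCast]; simp
                rw [hnil]
                simp only [pvEncChunk, List.flatMap_nil, List.append_nil]
                exact ih (i+3) _ (by omega)
              · rw [if_neg (by rintro ⟨-, -, -, m2⟩; rw [hs2] at m2; exact hx2 ((pvIsIn_singleton _ _).mp m2)),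
                    if_neg (by rintro ⟨-, -, m2⟩; rw [hg2] at m2; exact hx2 ((pvHexSet_contains _).mp m2))]
                rw [pvSlice_cons p i (i+1) hi (by omega), pvEncChunk_cons]
                have hnil : PySem.List.slice p (some ((i+1 : Nat) : Int)) (some ((i+1 : Nat) : Int)) = [] := by
                  rw [PySem.List.slice_natCast]; simp
                rw [hnil]
                simp only [pvEncChunk, List.flatMap_nil, List.append_nil]
                exact ih (i+1) _ (by omega)
            · rw [if_neg (by rintro ⟨-, -, m1, -⟩; rw [hs1] at m1; exact hx1 ((pvIsIn_singleton _ _).mp m1)),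
                  if_neg (by rintro ⟨-, m1, -⟩; rw [hg1] at m1; exact hx1 ((pvHexSet_contains _).mp m1))]
              rw [pvSlice_cons p i (i+1) hi (by omega), pvEncChunk_cons]
              have hnil : PySem.List.slice p (some ((i+1 : Nat) : Int)) (some ((i+1 : Nat) : Int)) = [] := by
                rw [PySem.List.slice_natCast]; simp
              rw [hnil]
              simp only [pvEncChunk, List.flatMap_nil, List.append_nil]
              exact ih (i+1) _ (by omega)
          · rw [if_neg (by rintro ⟨-, m, -, -⟩; exact hlen m),
                if_neg (by rintro ⟨m, -, -⟩; exact hlen m)]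
            rw [pvSlice_cons p i (i+1) hi (by omega), pvEncChunk_cons]
            have hnil : PySem.List.slice p (some ((i+1 : Nat) : Int)) (some ((i+1 : Nat) : Int)) = [] := by
              rw [PySem.List.slice_natCast]; simp
            rw [hnil]
            simp only [pvEncChunk, List.flatMap_nil, List.append_nil]
            exact ih (i+1) _ (by omega)
        · -- the skip case
          conv_lhs => rw [pvALoop]
          rw [dif_pos hi, if_neg (by rintro ⟨m, -⟩; exact hc m)]
          rw [pvBLoop_step p i acc hi hc]
          exact ih (i+1) _ (by omega)
      · rw [pvALoop_ge p i acc hi, pvBLoop_ge p i acc (by omega)]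

-- ===== VERDICT (by name: the statement is the Claim_ definition above) =====
theorem general_overlogutf8more_spec : Claim_equal_general_overlogutf8more := by
  intro payload _
  unfold Spec_general_overlogutf8more general_overlogutf8more general_overlogutf8more_alt
  by_cases h : payload = ""
  · simp [h]
  · rw [if_neg h, if_neg h]
    exact congrArg String.mk (pvMain payload.toList payload.toList.length 0 [] (by omega))
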